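-- pv_equiv track=rewrite | github.com/AnikDas1999/NIT-JSR-Cryptography-lab | 03_A_AdditionModulo.py | int_to_poly_str
-- ===== SOURCE A (Python) =====
-- def int_to_poly_str(mask: int) -> str:
--     """Convert integer mask -> human polynomial string (e.g. x^3 + x + 1)"""
--     if mask == 0:
--         return "0"
--     terms = []
--     i = 0
--     while mask:
--         if mask & 1:
--             if i == 0:
--                 terms.append("1")
--             elif i == 1:
--                 terms.append("x")
--             else:
--                 terms.append(f"x^{i}")
--         i += 1
--         mask >>= 1
--     return " + ".join(reversed(terms))
-- ===== SOURCE B (Python) =====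
-- def int_to_poly_str(mask: int) -> str:
--     """Convert integer mask -> human polynomial string (e.g. x^3 + x + 1)"""
--     if mask == 0:
--         return "0"
--     bits = bin(mask)[2:]
--     n = len(bits)
--     terms = []
--     for j, c in enumerate(bits):
--         if c == '1':
--             e = n - 1 - j
--             terms.append("1" if e == 0 else "x" if e == 1 else f"x^{e}")
--     return " + ".join(terms)
-- ===== Notes on version B (the rewrite author's own statement) =====
-- stated objective: idiomatic
-- what changed: B formats from the binary string bin(mask)[2:] traversed MSB-first with enumerate (exponent = len-1-j), joining directly without integer shifting or reversal, instead of A's bit-shift loop building low-to-high terms and reversing.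
import Mathlib
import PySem

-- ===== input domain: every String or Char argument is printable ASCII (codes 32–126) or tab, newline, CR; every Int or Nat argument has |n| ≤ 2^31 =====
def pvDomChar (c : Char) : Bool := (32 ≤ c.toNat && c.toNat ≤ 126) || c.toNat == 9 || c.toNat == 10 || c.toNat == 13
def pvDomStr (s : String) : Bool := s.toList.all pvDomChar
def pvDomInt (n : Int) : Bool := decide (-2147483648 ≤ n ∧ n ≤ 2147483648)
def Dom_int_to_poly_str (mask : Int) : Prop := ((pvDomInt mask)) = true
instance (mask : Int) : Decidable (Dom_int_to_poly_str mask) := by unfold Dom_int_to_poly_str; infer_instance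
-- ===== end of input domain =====

-- B formats from the MSB-first binary digit string (idiomatic forward pass, no reversal)
-- instead of A's LSB-first shift loop with a final reverse; return value only, no mutation.


-- ===== PORT A =====
-- A's while loop: append a term for each set bit, LSB first (index i), then reverse.
def pvTermA (i : Nat) : String :=
  if i = 0 then "1" else if i = 1 then "x" else "x^" ++ toString i

def pvLoopA (m i : Nat) : List String :=
  if m = 0 then []
  else (if m % 2 = 1 then [pvTermA i] else []) ++ pvLoopA (m / 2) (i + 1)
termination_by m
decreasing_by exact Nat.div_lt_self (Nat.pos_of_ne_zero (by assumption)) (by omega)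

def int_to_poly_str (mask : Int) : String :=
  if mask = 0 then "0"
  else String.intercalate " + " (pvLoopA mask.toNat 0).reverse

-- ===== PORT B =====
-- B: bits = bin(mask)[2:] (MSB-first binary digit characters), forward enumerate,
-- exponent = len - 1 - j, join without reversal.
def pvTermB (e : Nat) : String :=
  if e = 0 then "1" else if e = 1 then "x" else "x^" ++ toString e

-- Python's bin(): sign, "0b", then the binary digits of |mask| most-significant first.
def pvBin (mask : Int) : String :=
  (if mask < 0 then "-0b" else "0b")
    ++ String.ofList ((Nat.digits 2 mask.natAbs).reverse.map (fun d => if d = 1 then '1' else '0'))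

def int_to_poly_str_alt (mask : Int) : String :=
  if mask = 0 then "0"
  else
    let bits := (pvBin mask).toList.drop 2  -- bin(mask)[2:]; the start 2 ≥ 0, so the slice is drop 2
    let n := bits.length
    let terms := bits.zipIdx.filterMap
      (fun p => if p.1 = '1' then some (pvTermB (n - 1 - p.2)) else none)
    String.intercalate " + " terms

-- ===== PRECONDITION & SPEC =====
-- Pre_ excludes negative masks: there A's 'while mask: mask >>= 1' never terminates
-- (an arithmetic right shift of a negative int stays negative), so A returns nothing.
def Pre_int_to_poly_str (mask : Int) : Prop := 0 ≤ mask
instance (mask : Int) : Decidable (Pre_int_to_poly_str mask) := by unfold Pre_int_to_poly_str; infer_instance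
def pvWitness_int_to_poly_str : Int := (11)

def Spec_int_to_poly_str (mask : Int) (out : String) : Prop := out = int_to_poly_str_alt mask
instance (mask : Int) (out : String) : Decidable (Spec_int_to_poly_str mask out) := by unfold Spec_int_to_poly_str; infer_instance

-- ===== CLAIM (what is proved, stated in full; the proofs are below) =====
def Claim_equal_int_to_poly_str : Prop := ∀ (mask : Int), Dom_int_to_poly_str mask → Pre_int_to_poly_str mask → Spec_int_to_poly_str mask (int_to_poly_str mask)

-- ===== LEMMAS AND PROOFS =====

-- A's loop produces exactly one term per set binary digit, indexed from i.
theorem pvLoopA_eq_digits (m : Nat) : ∀ i, pvLoopA m i =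
    ((Nat.digits 2 m).zipIdx i).filterMap
      (fun p => if p.1 = 1 then some (pvTermA p.2) else none) := by
  induction m using Nat.strong_induction_on with
  | _ m ih =>
    intro i
    by_cases h : m = 0
    · subst h; simp [pvLoopA]
    · rw [pvLoopA, Nat.digits_def' (by norm_num : 1 < 2) (Nat.pos_of_ne_zero h)]
      rw [List.zipIdx_cons, List.filterMap_cons,
        ih (m / 2) (Nat.div_lt_self (Nat.pos_of_ne_zero h) (by omega)) (i + 1)]
      by_cases hb : m % 2 = 1 <;> simp [h, hb]

-- reversing A's LSB-first term list gives B's MSB-first scan with exponent len-1-j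
theorem pv_rev_eq (t : List Nat) : ∀ k,
    (((t.zipIdx k).filterMap (fun p => if p.1 = 1 then some (pvTermA p.2) else none)).reverse)
    = ((t.reverse.zipIdx 0).filterMap
        (fun p => if p.1 = 1 then some (pvTermB (k + t.length - 1 - p.2)) else none)) := by
  induction t with
  | nil => intro k; simp
  | cons a s ih =>
    intro k
    rw [List.zipIdx_cons]
    have hL : (((a, k) :: s.zipIdx (k + 1)).filterMap
        (fun p => if p.1 = 1 then some (pvTermA p.2) else none)).reverse
        = ((s.zipIdx (k + 1)).filterMap
            (fun p => if p.1 = 1 then some (pvTermA p.2) else none)).reverse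
          ++ (if a = 1 then [pvTermA k] else []) := by
      by_cases hb : a = 1 <;> simp [hb]
    rw [hL, ih (k + 1), List.reverse_cons, List.zipIdx_append, List.filterMap_append]
    have he : k + 1 + s.length - 1 = k + (a :: s).length - 1 := by simp
    rw [he]
    congr 1
    by_cases hb : a = 1 <;>
      simp [hb, pvTermA, pvTermB, List.length_reverse]

-- scanning the digit characters for '1' is scanning the digits for 1
theorem pv_chars_eq (t : List Nat) (f : Char × Nat → Option String) (g : Nat × Nat → Option String)
    (hfg : ∀ d j, f ((if d = 1 then '1' else '0'), j) = g (d, j)) :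
    ((t.map (fun d => if d = 1 then '1' else '0')).zipIdx 0).filterMap f
    = (t.zipIdx 0).filterMap g := by
  rw [List.zipIdx_map, List.filterMap_map]
  congr 1
  funext p
  exact hfg p.1 p.2

theorem int_to_poly_str_spec : Claim_equal_int_to_poly_str := by
  intro mask _ hpre
  unfold Spec_int_to_poly_str int_to_poly_str int_to_poly_str_alt
  by_cases h : mask = 0
  · simp [h]
  · simp only [if_neg h]
    have hpre' : 0 ≤ mask := hpre
    have hneg : ¬ mask < 0 := by omega
    have habs : mask.natAbs = mask.toNat := by omega
    have hbits : (pvBin mask).toList.drop 2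
        = ((Nat.digits 2 mask.toNat).reverse.map (fun d => if d = 1 then '1' else '0')) := by
      unfold pvBin
      rw [if_neg hneg, habs, String.toList_append]
      simp [String.toList_ofList]
    rw [hbits, pv_chars_eq _ _
        (fun p => if p.1 = 1 then
          some (pvTermB ((List.map (fun d => if d = 1 then '1' else '0')
            (Nat.digits 2 mask.toNat).reverse).length - 1 - p.2)) else none)
        (by intro d j; by_cases hd : d = 1 <;> simp [hd]),
      pvLoopA_eq_digits, pv_rev_eq]
    simp
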